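-- pv_equiv track=rewrite | github.com/Adam-Hoelscher/CodeFights.py | copycatKeeper.py | copycatKeeper
-- ===== SOURCE A (Python) =====
-- def copycatKeeper(books):
--
--     col_count = max(map(len, books))
--
--     transposed = []
--     for c in range(col_count):
--         temp = []
--         for r in books:
--             try:
--                 temp.append(r[c])
--             except:
--                 pass
--         temp.sort()
--         transposed.append(temp)
--
--     output = []
--     for r in range(len(books)):
--         temp = []
--         for c in range(col_count):
--             try:
--                 books[r][c]
--                 temp.append(transposed[c].pop(0))
--             except:
--                 pass
--         output.append(temp)
--
--     return output
-- ===== SOURCE B (Python) =====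
-- def copycatKeeper(books):
--     col_count = max(map(len, books))
--     output = [list(row) for row in books]
--     for c in range(col_count):
--         rows = [r for r in range(len(books)) if c < len(books[r])]
--         vals = sorted(books[r][c] for r in rows)
--         for r, v in zip(rows, vals):
--             output[r][c] = v
--     return output
-- ===== Notes on version B (the rewrite author's own statement) =====
-- stated objective: alternative
-- what changed: B fuses A's three phases (transpose-with-sort, then per-row FIFO popping from the column queues) into a single column-wise gather-sort-scatter that copies the row shape once and writes each sorted column value back by row index, with no queues and no second row/column double loop.
import Mathlib
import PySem

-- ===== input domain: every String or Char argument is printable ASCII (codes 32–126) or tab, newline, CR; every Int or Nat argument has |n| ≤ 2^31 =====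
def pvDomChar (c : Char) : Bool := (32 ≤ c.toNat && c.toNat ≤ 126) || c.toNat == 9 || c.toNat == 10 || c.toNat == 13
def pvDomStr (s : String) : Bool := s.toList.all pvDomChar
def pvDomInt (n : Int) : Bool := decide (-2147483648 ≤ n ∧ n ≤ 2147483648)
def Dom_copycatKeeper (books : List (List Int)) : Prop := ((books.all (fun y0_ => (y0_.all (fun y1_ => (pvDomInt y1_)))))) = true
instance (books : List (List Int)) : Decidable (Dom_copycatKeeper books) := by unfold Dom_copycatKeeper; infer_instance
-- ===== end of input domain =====

-- ===== PORT A =====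
-- inner loop of phase 1: `for r in books: try: temp.append(r[c]) except: pass`
-- (c comes from range(col_count), so c ≥ 0 and r[c] is plain forward indexing: r[c]? = none is exactly IndexError)
def pvA_col (books : List (List Int)) (c : Nat) : List Int :=
  books.foldl (fun temp r => match r[c]? with | some v => temp ++ [v] | none => temp) []

-- inner loop of phase 2 for one row: `for c in range(col_count): try: books[r][c]; temp.append(transposed[c].pop(0)) except: pass`
-- (the bare `except` also swallows the IndexError of pop(0) on an empty queue, hence the `[] => p` branch)
def pvA_rowStep (colCount : Nat) (row : List Int) (ts : List (List Int)) : List Int × List (List Int) :=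
  (List.range colCount).foldl (fun (p : List Int × List (List Int)) c =>
    match row[c]? with
    | none => p
    | some _ =>
      match p.2[c]?.getD [] with
      | [] => p
      | v :: rest => (p.1 ++ [v], p.2.set c rest)) ([], ts)

def copycatKeeper (books : List (List Int)) : List (List Int) :=
  let colCount := (PySem.List.max? (books.map List.length) (fun x => x)).getD 0
  let transposed := (List.range colCount).map (fun c =>
    PySem.List.sorted (pvA_col books c) (fun x => x) false)
  (books.foldl (fun (st : List (List Int) × List (List Int)) r =>
    let pr := pvA_rowStep colCount r st.2
    (st.1 ++ [pr.1], pr.2)) (([] : List (List Int)), transposed)).1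

-- ===== PORT B =====
-- `for r, v in zip(rows, vals): output[r][c] = v`
def pvB_scatter (c : Nat) (ps : List (Nat × Int)) (out : List (List Int)) : List (List Int) :=
  ps.foldl (fun o rv => o.set rv.1 ((o[rv.1]?.getD []).set c rv.2)) out

-- one iteration of `for c in range(col_count): ...`
def pvB_colStep (books : List (List Int)) (out : List (List Int)) (c : Nat) : List (List Int) :=
  let rows := (List.range books.length).filter (fun r => decide (c < (books[r]?.getD []).length))
  let vals := PySem.List.sorted (rows.map (fun r => (books[r]?.getD [])[c]?.getD 0)) (fun x => x) false
  pvB_scatter c (rows.zip vals) out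

def copycatKeeper_alt (books : List (List Int)) : List (List Int) :=
  let colCount := (PySem.List.max? (books.map List.length) (fun x => x)).getD 0
  let output := books.map (fun row => row)
  (List.range colCount).foldl (pvB_colStep books) output

-- ===== PRECONDITION & SPEC =====
-- Pre_ excludes only the empty list, on which Python A raises ValueError (max() of an empty sequence); B raises there too.
def Pre_copycatKeeper (books : List (List Int)) : Prop := books ≠ []
instance (books : List (List Int)) : Decidable (Pre_copycatKeeper books) := by unfold Pre_copycatKeeper; infer_instance
def pvWitness_copycatKeeper : List (List Int) := [[3, 1], [2]]

def Spec_copycatKeeper (books : List (List Int)) (out : List (List Int)) : Prop := out = copycatKeeper_alt books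
instance (books : List (List Int)) (out : List (List Int)) : Decidable (Spec_copycatKeeper books out) := by unfold Spec_copycatKeeper; infer_instance

-- ===== CLAIM (what is proved, stated in full; the proofs are below) =====
def Claim_equal_copycatKeeper : Prop := ∀ (books : List (List Int)), Dom_copycatKeeper books → Pre_copycatKeeper books → Spec_copycatKeeper books (copycatKeeper books)

-- ===== LEMMAS AND PROOFS =====

-- number of rows of `bs` that have a column c
def pvCnt (bs : List (List Int)) (c : Nat) : Nat := bs.countP (fun row => decide (c < row.length))

-- the sorted column c
def pvSC (books : List (List Int)) (c : Nat) : List Int :=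
  PySem.List.sorted (books.filterMap (fun row => row[c]?)) (fun x => x) false

-- the common reference result: entry (r, c) is the (rank of row r in column c)-th sorted column value
def pvRef (books : List (List Int)) : List (List Int) :=
  (List.range books.length).map (fun r =>
    (List.range ((books[r]?.getD []).length)).map (fun c =>
      (pvSC books c)[pvCnt (books.take r) c]?.getD 0))

-- B's intermediate state after the columns < k have been processed
def pvMix (books : List (List Int)) (k : Nat) : List (List Int) :=
  (List.range books.length).map (fun r =>
    (List.range ((books[r]?.getD []).length)).map (fun c =>
      if c < k then (pvSC books c)[pvCnt (books.take r) c]?.getD 0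
      else (books[r]?.getD [])[c]?.getD 0))

-- A's phase-2 output for the remaining rows `rows`, the rows `pref` having been consumed already
def pvRender (books : List (List Int)) : List (List Int) → List (List Int) → List (List Int)
  | _, [] => []
  | pref, row :: rest =>
    ((List.range row.length).map (fun c => (pvSC books c)[pvCnt pref c]?.getD 0)) ::
      pvRender books (pref ++ [row]) rest



lemma pvA_col_eq' (c : Nat) : ∀ (bs : List (List Int)) (acc : List Int),
    bs.foldl (fun temp r => match r[c]? with | some v => temp ++ [v] | none => temp) acc
      = acc ++ bs.filterMap (fun r => r[c]?) := by
  intro bs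
  induction bs with
  | nil => simp
  | cons r rest ih =>
    intro acc
    cases h : r[c]? with
    | none => simp [List.foldl_cons, h, ih]
    | some v => simp [List.foldl_cons, h, ih]

lemma setMapRange {α : Type} (n i : Nat) (g : Nat → α) (x : α) :
    ((List.range n).map g).set i x = (List.range n).map (fun c => if c = i then x else g c) := by
  apply List.ext_getElem <;> simp
  intro j hj
  rw [List.getElem_set]
  by_cases hji : j = i
  · simp [hji]
  · simp [hji]
    intro hij; exact absurd hij.symm hji

lemma headI_drop (l : List Int) (n : Nat) : (l.drop n).headI = l[n]?.getD 0 := by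
  induction l generalizing n with
  | nil => simp
  | cons a t ih => cases n <;> simp [ih]

lemma mapRangeGet {α : Type} (l : List α) (d : α) :
    (List.range l.length).map (fun i => l[i]?.getD d) = l := by
  apply List.ext_getElem <;> simp
  intro i h1 h2
  simp [List.getElem?_eq_getElem h1]

lemma length_filterMap_col (c : Nat) (books : List (List Int)) :
    (books.filterMap (fun row => row[c]?)).length
      = books.countP (fun row => decide (c < row.length)) := by
  induction books with
  | nil => simp
  | cons r rest ih =>
    rw [List.filterMap_cons, List.countP_cons]
    cases h : r[c]? with
    | none =>
      have hc : ¬ c < r.length := by simpa [List.getElem?_eq_none_iff] using h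
      simp [ih, hc]
    | some v =>
      have hc : c < r.length := by
        rw [List.getElem?_eq_some_iff] at h
        exact h.1
      simp [ih, hc]

lemma pvA_inner (row : List Int) : ∀ (n s : Nat) (acc : List Int) (m : Nat) (g : Nat → List Int),
    s + n ≤ m →
    (∀ c, s ≤ c → c < row.length → g c ≠ []) →
    (List.range' s n).foldl (fun (p : List Int × List (List Int)) c =>
      match row[c]? with
      | none => p
      | some _ =>
        match p.2[c]?.getD [] with
        | [] => p
        | v :: rest => (p.1 ++ [v], p.2.set c rest)) (acc, (List.range m).map g)
    = (acc ++ ((List.range' s n).filter (fun c => decide (c < row.length))).map (fun c => (g c).headI),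
       (List.range m).map (fun c => if s ≤ c ∧ c < s + n ∧ c < row.length then (g c).tail else g c)) := by
  intro n
  induction n with
  | zero =>
    intro s acc m g _ _
    rw [List.range'_zero, List.foldl_nil, List.filter_nil, List.map_nil, List.append_nil]
    exact congrArg _ (List.map_congr_left (fun c hc => by rw [if_neg (by omega)])).symm
  | succ n ih =>
    intro s acc m g hm hne
    rw [List.range'_succ, List.foldl_cons, List.filter_cons]
    have hsm : s < m := by omega
    have hget : ((List.range m).map g)[s]?.getD [] = g s := by
      have hsm' : s < ((List.range m).map g).length := by simpa using hsm
      simp [hsm]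
    by_cases hs : s < row.length
    · have hrow : row[s]? = some row[s] := List.getElem?_eq_getElem hs
      have hgs : g s ≠ [] := hne s le_rfl hs
      obtain ⟨v, rest, hvr⟩ := List.exists_cons_of_ne_nil hgs
      simp only [hrow, hget, hvr]
      rw [setMapRange]
      rw [ih (s+1) (acc ++ [v]) m (fun c => if c = s then rest else g c) (by omega)
          (by intro c hc1 hc2
              have : c ≠ s := by omega
              simp [this]
              exact hne c (by omega) hc2)]
      simp only [Prod.mk.injEq]
      constructor
      · simp [hs]
        exact ⟨by rw [hvr]; rfl, fun a h1 _ _ => by rw [if_neg (by omega)]⟩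
      · apply List.map_congr_left
        intro c hc
        simp at hc
        by_cases hcs : c = s
        · subst hcs
          simp [hs, hvr]
        · simp [hcs]
          split_ifs <;> first | rfl | omega
    · have hrow : row[s]? = none := by simp [List.getElem?_eq_none_iff]; omega
      simp only [hrow]
      rw [ih (s+1) acc m g (by omega) (by intro c hc1 hc2; exact hne c (by omega) hc2)]
      simp only [Prod.mk.injEq]
      constructor
      · simp [hs]
      · apply List.map_congr_left
        intro c hc
        simp at hc
        split_ifs <;> first | rfl | omega

lemma pvA_col_eq (books : List (List Int)) (c : Nat) :
    pvA_col books c = books.filterMap (fun r => r[c]?) := by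
  simpa using pvA_col_eq' c books []

lemma length_pvSC (books : List (List Int)) (c : Nat) :
    (pvSC books c).length = pvCnt books c := by
  rw [pvSC, PySem.List.length_sorted, length_filterMap_col]; rfl

lemma le_colCount (books : List (List Int)) :
    ∀ row ∈ books, row.length ≤ (PySem.List.max? (books.map List.length) (fun x => x)).getD 0 := by
  intro row hrow
  cases h : PySem.List.max? (books.map List.length) (fun x => x) with
  | none =>
    rw [PySem.List.max?_eq_none_iff] at h
    simp at h
    subst h; simp at hrow
  | some m =>
    have := PySem.List.max?_isMax h row.length (by simp; exact ⟨row, hrow, rfl⟩)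
    simpa using this

lemma filter_lt_range (m k : Nat) (h : k ≤ m) :
    (List.range m).filter (fun c => decide (c < k)) = List.range k := by
  have hmk : m = k + (m - k) := by omega
  rw [hmk, List.range_add, List.filter_append]
  have h1 : (List.range k).filter (fun c => decide (c < k)) = List.range k := by
    apply List.filter_eq_self.mpr
    intro a ha
    simp [List.mem_range.mp ha]
  have h2 : ((List.range (m - k)).map (k + ·)).filter (fun c => decide (c < k)) = [] := by
    apply List.filter_eq_nil_iff.mpr
    intro a ha
    simp at ha
    obtain ⟨b, _, hb⟩ := ha
    simp; omega
  simp [h1, h2]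

lemma pvA_rowStep_eq (colCount : Nat) (row : List Int) (g : Nat → List Int)
    (hne : ∀ c, c < row.length → g c ≠ []) (hrl : row.length ≤ colCount) :
    pvA_rowStep colCount row ((List.range colCount).map g)
      = ((List.range row.length).map (fun c => (g c).headI),
         (List.range colCount).map (fun c => if c < row.length then (g c).tail else g c)) := by
  have h0 := pvA_inner row colCount 0 [] colCount g (by omega) (fun c _ hc => hne c hc)
  rw [← List.range_eq_range'] at h0
  rw [pvA_rowStep, h0]
  simp only [Prod.mk.injEq]
  constructor
  · rw [List.nil_append, filter_lt_range colCount row.length hrl]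
  · apply List.map_congr_left
    intro c hc
    simp at hc
    by_cases h : c < row.length
    · rw [if_pos ⟨by omega, by omega, h⟩, if_pos h]
    · rw [if_neg (by omega), if_neg h]

lemma pvA_outer (books : List (List Int)) (colCount : Nat)
    (hcc : ∀ row ∈ books, row.length ≤ colCount) :
    ∀ (rows pref : List (List Int)) (out : List (List Int)),
      pref ++ rows = books →
      (rows.foldl (fun (st : List (List Int) × List (List Int)) r =>
          let pr := pvA_rowStep colCount r st.2
          (st.1 ++ [pr.1], pr.2))
        (out, (List.range colCount).map (fun c => (pvSC books c).drop (pvCnt pref c)))).1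
      = out ++ pvRender books pref rows := by
  intro rows
  induction rows with
  | nil => intro pref out _; simp [pvRender]
  | cons row rest ih =>
    intro pref out hb
    have hrowmem : row ∈ books := by rw [← hb]; simp
    have hrl : row.length ≤ colCount := hcc row hrowmem
    have hne : ∀ c, c < row.length → (pvSC books c).drop (pvCnt pref c) ≠ [] := by
      intro c hc
      rw [ne_eq, List.drop_eq_nil_iff, length_pvSC, not_le, ← hb]
      simp only [pvCnt, List.countP_append, List.countP_cons]
      simp [hc]
    rw [List.foldl_cons]
    simp only [pvA_rowStep_eq colCount row _ hne hrl]
    have hts : (List.range colCount).map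
        (fun c => if c < row.length then ((pvSC books c).drop (pvCnt pref c)).tail
                  else (pvSC books c).drop (pvCnt pref c))
        = (List.range colCount).map (fun c => (pvSC books c).drop (pvCnt (pref ++ [row]) c)) := by
      apply List.map_congr_left
      intro c _
      simp only [pvCnt, List.countP_append, List.countP_cons, List.countP_nil]
      by_cases h : c < row.length
      · rw [if_pos h, List.tail_drop]
        simp [h]
      · rw [if_neg h]
        simp [h]
    rw [hts, ih (pref ++ [row]) _ (by rw [← hb]; simp)]
    rw [pvRender]
    have hhead : (List.range row.length).map (fun c => ((pvSC books c).drop (pvCnt pref c)).headI)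
        = (List.range row.length).map (fun c => (pvSC books c)[pvCnt pref c]?.getD 0) := by
      apply List.map_congr_left
      intro c _
      rw [headI_drop]
    rw [hhead]
    simp

lemma copycatKeeper_eq_render (books : List (List Int)) :
    copycatKeeper books = pvRender books [] books := by
  simp only [copycatKeeper]
  have htrans : (List.range ((PySem.List.max? (books.map List.length) (fun x => x)).getD 0)).map
        (fun c => PySem.List.sorted (pvA_col books c) (fun x => x) false)
      = (List.range ((PySem.List.max? (books.map List.length) (fun x => x)).getD 0)).map
        (fun c => (pvSC books c).drop (pvCnt [] c)) := by
    apply List.map_congr_left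
    intro c _
    rw [pvA_col_eq]
    simp [pvSC, pvCnt]
  rw [htrans, pvA_outer books _ (le_colCount books) books [] [] rfl]
  simp

lemma length_pvRender (books : List (List Int)) :
    ∀ (rows pref : List (List Int)), (pvRender books pref rows).length = rows.length := by
  intro rows
  induction rows with
  | nil => intro pref; simp [pvRender]
  | cons row rest ih => intro pref; simp [pvRender, ih]

lemma pvRender_getElem (books : List (List Int)) :
    ∀ (rows pref : List (List Int)) (r : Nat), r < rows.length →
      (pvRender books pref rows)[r]? =
        some ((List.range ((rows[r]?.getD []).length)).map
          (fun c => (pvSC books c)[pvCnt (pref ++ rows.take r) c]?.getD 0)) := by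
  intro rows
  induction rows with
  | nil => intro pref r hr; simp at hr
  | cons row rest ih =>
    intro pref r hr
    cases r with
    | zero => simp [pvRender]
    | succ r =>
      rw [pvRender]
      simp only [List.getElem?_cons_succ, List.take_succ_cons, List.getElem?_cons_succ]
      rw [ih (pref ++ [row]) r (by simpa using hr)]
      simp

lemma render_eq_ref (books : List (List Int)) :
    pvRender books [] books = pvRef books := by
  apply List.ext_getElem?
  intro r
  by_cases hr : r < books.length
  · rw [pvRender_getElem books books [] r hr]
    simp [pvRef, List.getElem?_map, List.getElem?_range, hr]
  · rw [List.getElem?_eq_none (by rw [length_pvRender]; omega),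
        List.getElem?_eq_none (by simp [pvRef]; omega)]

lemma copycatKeeper_eq_ref (books : List (List Int)) :
    copycatKeeper books = pvRef books := by
  rw [copycatKeeper_eq_render, render_eq_ref]

lemma scatter_get (c : Nat) :
    ∀ (ps : List (Nat × Int)) (out : List (List Int)) (r : Nat), (ps.map Prod.fst).Nodup →
      (pvB_scatter c ps out)[r]? =
        match ps.find? (fun p => p.1 == r) with
        | some q => out[r]?.map (fun row => row.set c q.2)
        | none => out[r]? := by
  intro ps
  induction ps with
  | nil => intro out r _; simp [pvB_scatter]
  | cons p rest ih =>
    intro out r hnd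
    simp only [List.map_cons, List.nodup_cons] at hnd
    rw [pvB_scatter, List.foldl_cons, ← pvB_scatter]
    rw [ih _ r hnd.2]
    by_cases hpr : p.1 = r
    · have hfind : List.find? (fun q => q.1 == r) (p :: rest) = some p := by
        simp [List.find?_cons, hpr]
      have hfind2 : List.find? (fun q => q.1 == r) rest = none := by
        apply List.find?_eq_none.mpr
        intro q hq
        simp
        intro hq1
        have hqm : q.1 ∈ rest.map Prod.fst := List.mem_map_of_mem hq
        rw [hq1, ← hpr] at hqm
        exact absurd hqm hnd.1
      rw [hfind2, hfind]
      subst hpr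
      by_cases hlen : p.1 < out.length
      · rw [List.getElem?_set_self (by omega), List.getElem?_eq_getElem hlen]
        simp
      · rw [List.getElem?_eq_none (by simp; omega), List.getElem?_eq_none (by omega)]
        simp
    · have hfind : List.find? (fun q => q.1 == r) (p :: rest) = List.find? (fun q => q.1 == r) rest := by
        simp [List.find?_cons, hpr]
      rw [hfind]
      have hget : (out.set p.1 ((out[p.1]?.getD []).set c p.2))[r]? = out[r]? :=
        List.getElem?_set_ne (by omega)
      cases List.find? (fun q => q.1 == r) rest <;> simp [hget]

lemma find_zip_mono :
    ∀ (rows : List Nat) (vals : List Int) (r : Nat),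
      rows.Pairwise (· < ·) → rows.length = vals.length →
      (rows.zip vals).find? (fun p => p.1 == r) =
        if r ∈ rows then (vals[rows.countP (fun x => decide (x < r))]?).map (fun v => (r, v))
        else none := by
  intro rows
  induction rows with
  | nil => intro vals r _ _; simp
  | cons a rest ih =>
    intro vals r hp hl
    cases vals with
    | nil => simp at hl
    | cons va vrest =>
      simp only [List.length_cons] at hl
      rw [List.pairwise_cons] at hp
      rw [List.zip_cons_cons, List.find?_cons]
      by_cases har : a = r
      · subst har
        have hc0 : List.countP (fun x => decide (x < a)) (a :: rest) = 0 := by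
          rw [List.countP_eq_zero]
          intro x hx
          simp at hx ⊢
          rcases hx with h | h
          · omega
          · have := hp.1 x h; omega
        simp [hc0]
      · have hba : (a == r) = false := by simp [har]
        rw [hba]
        rw [ih vrest r hp.2 (by omega)]
        by_cases hmem : r ∈ rest
        · have harr : a < r := hp.1 r hmem
          have hcount : List.countP (fun x => decide (x < r)) (a :: rest)
              = List.countP (fun x => decide (x < r)) rest + 1 := by
            rw [List.countP_cons]
            simp [harr]
          simp [hmem, hcount]
        · simp [hmem]
          intro h; exact absurd h.symm har

lemma rangeCountP_take (l : List (List Int)) (c : Nat) :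
    ∀ r, r ≤ l.length →
      (List.range r).countP (fun x => decide (c < (l[x]?.getD []).length)) = pvCnt (l.take r) c := by
  intro r
  induction r with
  | zero => intro _; simp [pvCnt]
  | succ r ih =>
    intro hr
    have hx : l[r]? = some l[r] := List.getElem?_eq_getElem (by omega)
    rw [List.range_succ, List.countP_append, ih (by omega)]
    simp only [pvCnt, List.take_add_one, hx, Option.toList_some, List.countP_append, List.countP_cons]
    simp

lemma countP_filter_range (l : List (List Int)) (c r : Nat) (hr : r ≤ l.length) :
    ((List.range l.length).filter (fun x => decide (c < (l[x]?.getD []).length))).countP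
        (fun x => decide (x < r)) = pvCnt (l.take r) c := by
  rw [List.countP_filter]
  have hsplit : l.length = r + (l.length - r) := by omega
  rw [hsplit, List.range_add, List.countP_append]
  have h2 : ((List.range (l.length - r)).map (r + ·)).countP
      (fun x => decide (x < r) && decide (c < (l[x]?.getD []).length)) = 0 := by
    rw [List.countP_eq_zero]
    intro x hx
    simp at hx ⊢
    obtain ⟨b, _, hb⟩ := hx
    intro h
    omega
  rw [h2, Nat.add_zero, ← rangeCountP_take l c r hr]
  apply List.countP_congr
  intro x hx
  simp at hx
  simp [hx]

lemma colIndex_map (l : List (List Int)) (c : Nat) :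
    ((List.range l.length).filter (fun r => decide (c < (l[r]?.getD []).length))).map
        (fun r => (l[r]?.getD [])[c]?.getD 0)
      = l.filterMap (fun row => row[c]?) := by
  induction l with
  | nil => simp
  | cons row rest ih =>
    rw [List.length_cons, List.range_succ_eq_map, List.filter_cons, List.filter_map,
        List.filterMap_cons]
    by_cases h : c < row.length
    · have hsome : row[c]? = some row[c] := List.getElem?_eq_getElem h
      simp only [List.getElem?_cons_zero, Option.getD_some, h, decide_true, if_true, hsome,
        List.map_cons, List.map_map]
      rw [← ih]
      congr 1
    · have hnone : row[c]? = none := by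
        rw [List.getElem?_eq_none_iff]; omega
      simp only [List.getElem?_cons_zero, Option.getD_some, h, decide_false, Bool.false_eq_true,
        if_false, hnone, List.map_map]
      rw [← ih]
      simp only [Function.comp_def, List.getElem?_cons_succ]
      rfl

lemma pvCnt_take_lt (books : List (List Int)) (r c : Nat) (hr : r < books.length)
    (hc : c < (books[r]?.getD []).length) : pvCnt (books.take r) c < pvCnt books c := by
  conv_rhs => rw [← List.take_append_drop r books]
  simp only [pvCnt]
  rw [List.countP_append, List.drop_eq_getElem_cons hr, List.countP_cons]
  rw [List.getElem?_eq_getElem hr] at hc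
  simp only [Option.getD_some] at hc
  simp [hc]

lemma pvMix_getElem (books : List (List Int)) (k r : Nat) (hr : r < books.length) :
    (pvMix books k)[r]? = some ((List.range ((books[r]?.getD []).length)).map (fun c =>
      if c < k then (pvSC books c)[pvCnt (books.take r) c]?.getD 0
      else (books[r]?.getD [])[c]?.getD 0)) := by
  simp [pvMix, hr]

lemma pvB_colStep_mix (books : List (List Int)) (c : Nat) :
    pvB_colStep books (pvMix books c) c = pvMix books (c + 1) := by
  rw [pvB_colStep]
  have hvals : PySem.List.sorted
      (((List.range books.length).filter (fun r => decide (c < (books[r]?.getD []).length))).map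
        (fun r => (books[r]?.getD [])[c]?.getD 0)) (fun x => x) false = pvSC books c := by
    rw [colIndex_map, pvSC]
  rw [hvals]
  set rows := (List.range books.length).filter (fun r => decide (c < (books[r]?.getD []).length)) with hrows
  have hpair : rows.Pairwise (· < ·) := (List.pairwise_lt_range).filter _
  have hlen : rows.length = (pvSC books c).length := by
    rw [length_pvSC, hrows, ← List.countP_eq_length_filter]
    have := rangeCountP_take books c books.length (le_refl _)
    simpa using this
  have hnd : ((rows.zip (pvSC books c)).map Prod.fst).Nodup := by
    rw [List.map_fst_zip (le_of_eq hlen)]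
    exact hpair.imp (fun h => Nat.ne_of_lt h)
  apply List.ext_getElem?
  intro r
  rw [scatter_get c _ _ r hnd, find_zip_mono rows (pvSC books c) r hpair hlen]
  by_cases hr : r < books.length
  · rw [pvMix_getElem books c r hr, pvMix_getElem books (c+1) r hr]
    by_cases hc : c < (books[r]?.getD []).length
    · have hc' : c < books[r].length := by
        rw [List.getElem?_eq_getElem hr] at hc; simpa using hc
      have hmem : r ∈ rows := by rw [hrows]; simp [List.mem_filter, hc', hr]
      rw [if_pos hmem]
      have hcount : rows.countP (fun x => decide (x < r)) = pvCnt (books.take r) c := by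
        rw [hrows]; exact countP_filter_range books c r (le_of_lt hr)
      have hlt : pvCnt (books.take r) c < (pvSC books c).length := by
        rw [length_pvSC]; exact pvCnt_take_lt books r c hr hc
      rw [hcount, List.getElem?_eq_getElem hlt]
      simp only [Option.map_some, Option.map_some]
      rw [setMapRange]
      congr 1
      apply List.map_congr_left
      intro i hi
      simp only [List.mem_range] at hi
      by_cases hic : i = c
      · subst hic
        simp [List.getElem?_eq_getElem hlt]
      · rw [if_neg hic]
        split_ifs <;> first | rfl | omega
    · have hmem : r ∉ rows := by
        rw [hrows]
        simp [List.mem_filter]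
        intro _
        omega
      rw [if_neg hmem]
      dsimp only
      congr 1
      apply List.map_congr_left
      intro i hi
      simp only [List.mem_range] at hi
      split_ifs <;> first | rfl | omega
  · have hmem : r ∉ rows := by
      rw [hrows]
      simp [List.mem_filter]
      intro h
      omega
    rw [if_neg hmem]
    dsimp only
    rw [List.getElem?_eq_none (by simp [pvMix]; omega),
        List.getElem?_eq_none (by simp [pvMix]; omega)]

lemma pvMix_zero (books : List (List Int)) : pvMix books 0 = books.map (fun row => row) := by
  have hid : books.map (fun row => row) = books := by simp
  rw [hid, pvMix]
  apply List.ext_getElem?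
  intro r
  by_cases hr : r < books.length
  · simp only [List.getElem?_map, List.getElem?_range, hr]
    rw [List.getElem?_eq_getElem hr]
    simp only [Option.map_some]
    congr 1
    have := mapRangeGet (books[r]?.getD []) (0 : Int)
    rw [List.getElem?_eq_getElem hr] at this ⊢
    simpa using this
  · rw [List.getElem?_eq_none (by simpa using (by omega : books.length ≤ r)),
        List.getElem?_eq_none (by omega)]

lemma pvFoldB (books : List (List Int)) :
    ∀ m, (List.range m).foldl (pvB_colStep books) (books.map (fun row => row)) = pvMix books m := by
  intro m
  induction m with
  | zero => simp [pvMix_zero]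
  | succ m ih =>
    rw [List.range_succ, List.foldl_append, ih, List.foldl_cons, List.foldl_nil, pvB_colStep_mix]

lemma pvMix_top (books : List (List Int)) (k : Nat) (hk : ∀ row ∈ books, row.length ≤ k) :
    pvMix books k = pvRef books := by
  rw [pvMix, pvRef]
  apply List.map_congr_left
  intro r hr
  simp only [List.mem_range] at hr
  apply List.map_congr_left
  intro c hc
  simp only [List.mem_range] at hc
  have hrow : (books[r]?.getD []).length ≤ k := by
    rw [List.getElem?_eq_getElem hr]
    exact hk books[r] (List.getElem_mem hr)
  rw [if_pos (by omega)]

lemma copycatKeeper_alt_eq_ref (books : List (List Int)) :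
    copycatKeeper_alt books = pvRef books := by
  simp only [copycatKeeper_alt]
  rw [pvFoldB, pvMix_top books _ (le_colCount books)]

-- ===== VERDICT (by name: the statement is the Claim_ definition above) =====
theorem copycatKeeper_spec : Claim_equal_copycatKeeper := by
  intro books _ _
  unfold Spec_copycatKeeper
  rw [copycatKeeper_eq_ref, copycatKeeper_alt_eq_ref]
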